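-- pv_equiv track=rewrite | github.com/luisgg98/Sistemas_Legados | Practica3/djangoProject/wrapper.py | __parse_all_columns
-- ===== SOURCE A (Python) =====
-- def __parse_all_columns(resultado,cinta):
--     """Generamos una lista de listas con los campos [[nombre,tipo,cinta,registro]]"""
--     data = []
--     if len(resultado) % 5 == 0:
--         i = 0
--         while i < len(resultado):
--             if resultado[i+3] == cinta:
--                 r4 = resultado[i + 4].replace(" ", "")
--                 e = [resultado[i + 1], resultado[i + 2], resultado[i + 3], r4]
--                 data = data + [e]
--             i = i + 5
--     return data
-- ===== SOURCE B (Python) =====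
-- def __parse_all_columns(resultado, cinta):
--     """Columnar approach: pull the four relevant fields out as strided-slice
--     columns, then zip the columns and filter by the cinta column."""
--     if len(resultado) % 5 != 0:
--         return []
--     nombres   = resultado[1::5]
--     tipos     = resultado[2::5]
--     cintas    = resultado[3::5]
--     registros = resultado[4::5]
--     return [[n, t, c, r.replace(" ", "")]
--             for n, t, c, r in zip(nombres, tipos, cintas, registros)
--             if c == cinta]
-- ===== Notes on version B (the rewrite author's own statement) =====
-- stated objective: alternative
-- what changed: Replaces A's index-stepping while-loop with quadratic list concatenation by a columnar algorithm: four strided slices extract the name/type/cinta/register columns, which are then zipped and filtered in one pass.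
import Mathlib
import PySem

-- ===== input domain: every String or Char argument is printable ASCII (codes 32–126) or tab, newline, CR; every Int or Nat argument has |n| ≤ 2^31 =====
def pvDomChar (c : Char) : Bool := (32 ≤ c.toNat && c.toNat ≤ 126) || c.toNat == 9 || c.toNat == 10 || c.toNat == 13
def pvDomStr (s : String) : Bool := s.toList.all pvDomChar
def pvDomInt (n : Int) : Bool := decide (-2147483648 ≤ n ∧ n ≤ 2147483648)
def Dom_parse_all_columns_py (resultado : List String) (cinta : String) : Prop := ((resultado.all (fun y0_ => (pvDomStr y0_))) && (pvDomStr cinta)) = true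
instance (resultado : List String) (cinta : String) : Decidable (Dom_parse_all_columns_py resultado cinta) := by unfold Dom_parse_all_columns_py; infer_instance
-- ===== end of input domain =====

-- B is a columnar re-implementation: four strided slices give the name/type/cinta/register
-- columns, which are zipped and filtered in one pass (alternative algorithm, same cost class).

-- ===== PORT A =====
-- the while-loop: state (i, data), i stepping by 5 (i is always ≥ 0, so carried as Nat)
def pvALoop (resultado : List String) (cinta : String) (i : Nat)
    (data : List (List String)) : List (List String) :=
  if i < resultado.length then
    let data' :=
      if PySem.List.pyGetD resultado ((i : Int) + 3) "" = cinta then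
        data ++ [[PySem.List.pyGetD resultado ((i : Int) + 1) "",
                  PySem.List.pyGetD resultado ((i : Int) + 2) "",
                  PySem.List.pyGetD resultado ((i : Int) + 3) "",
                  PySem.Str.replace (PySem.List.pyGetD resultado ((i : Int) + 4) "") " " ""]]
      else data
    pvALoop resultado cinta (i + 5) data'
  else data
termination_by resultado.length - i

def parse_all_columns_py (resultado : List String) (cinta : String) : List (List String) :=
  if resultado.length % 5 = 0 then pvALoop resultado cinta 0 [] else []

-- ===== PORT B =====
-- hand port of the stride-5 slice: pvStride5 (l.drop k) is exactly Python's l[k::5] for k ≥ 0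
def pvStride5 : List String → List String
  | x :: xs => x :: pvStride5 (xs.drop 4)
  | [] => []
termination_by l => l.length
decreasing_by simp

-- zip(nombres, tipos, cintas, registros) + filtering comprehension
def parse_all_columns_py_alt (resultado : List String) (cinta : String) : List (List String) :=
  if resultado.length % 5 ≠ 0 then []
  else
    let nombres   := pvStride5 (resultado.drop 1)
    let tipos     := pvStride5 (resultado.drop 2)
    let cintas    := pvStride5 (resultado.drop 3)
    let registros := pvStride5 (resultado.drop 4)
    ((nombres.zip tipos).zip (cintas.zip registros)).filterMap (fun p =>
      if p.2.1 = cinta then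
        some [p.1.1, p.1.2, p.2.1, PySem.Str.replace p.2.2 " " ""]
      else none)

-- ===== PRECONDITION & SPEC =====
def Spec_parse_all_columns_py (resultado : List String) (cinta : String) (out : List (List String)) : Prop := out = parse_all_columns_py_alt resultado cinta
instance (resultado : List String) (cinta : String) (out : List (List String)) : Decidable (Spec_parse_all_columns_py resultado cinta out) := by unfold Spec_parse_all_columns_py; infer_instance

-- ===== CLAIM =====
def Claim_equal_parse_all_columns_py : Prop := ∀ (resultado : List String) (cinta : String), Dom_parse_all_columns_py resultado cinta → Spec_parse_all_columns_py resultado cinta (parse_all_columns_py resultado cinta)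

-- ===== LEMMAS AND PROOFS =====

-- B's body (columns built from an arbitrary suffix), for the loop invariant
def pvBBody (rest : List String) (cinta : String) : List (List String) :=
  (((pvStride5 (rest.drop 1)).zip (pvStride5 (rest.drop 2))).zip
    ((pvStride5 (rest.drop 3)).zip (pvStride5 (rest.drop 4)))).filterMap (fun p =>
      if p.2.1 = cinta then
        some [p.1.1, p.1.2, p.2.1, PySem.Str.replace p.2.2 " " ""]
      else none)

lemma pvBBody_cons5 (a b c d e : String) (rest : List String) (cinta : String) :
    pvBBody (a :: b :: c :: d :: e :: rest) cinta =
      (if d = cinta then [[b, c, d, PySem.Str.replace e " " ""]] else []) ++ pvBBody rest cinta := by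
  have h1 : (a :: b :: c :: d :: e :: rest).drop 1 = b :: c :: d :: e :: rest := rfl
  have h2 : (a :: b :: c :: d :: e :: rest).drop 2 = c :: d :: e :: rest := rfl
  have h3 : (a :: b :: c :: d :: e :: rest).drop 3 = d :: e :: rest := rfl
  have h4 : (a :: b :: c :: d :: e :: rest).drop 4 = e :: rest := rfl
  have s1 : pvStride5 (b :: c :: d :: e :: rest) = b :: pvStride5 (rest.drop 1) := by
    rw [pvStride5]; try rfl
  have s2 : pvStride5 (c :: d :: e :: rest) = c :: pvStride5 (rest.drop 2) := by
    rw [pvStride5]; try rfl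
  have s3 : pvStride5 (d :: e :: rest) = d :: pvStride5 (rest.drop 3) := by
    rw [pvStride5]; try rfl
  have s4 : pvStride5 (e :: rest) = e :: pvStride5 (rest.drop 4) := by
    rw [pvStride5]; try rfl
  unfold pvBBody
  rw [h1, h2, h3, h4, s1, s2, s3, s4]
  simp only [List.zip_cons_cons, List.filterMap_cons]
  by_cases hd : d = cinta <;> simp [hd]

-- reading field k of the current record through the flat list
lemma pvGet_pref (l rest : List String) (k : Nat) (hk : k < rest.length) :
    PySem.List.pyGetD (l ++ rest) ((l.length : Int) + (k : Int)) "" = rest.getD k "" := by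
  have : ((l.length : Int) + (k : Int)) = ((l.length + k : Nat) : Int) := by push_cast; ring
  rw [this, PySem.List.pyGetD_natCast]
  simp [List.getD, hk]

lemma pvALoop_spec (n : Nat) : ∀ (rest l : List String) (cinta : String)
    (data : List (List String)), rest.length = n → rest.length % 5 = 0 →
    pvALoop (l ++ rest) cinta l.length data = data ++ pvBBody rest cinta := by
  induction n using Nat.strong_induction_on with
  | _ n ih =>
    intro rest l cinta data hn hmod
    match rest with
    | [] =>
      rw [pvALoop]
      have e : pvStride5 [] = [] := by rw [pvStride5.eq_2]
      simp [pvBBody, e]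
    | [a] | [a,b] | [a,b,c] | [a,b,c,d] => simp at hmod
    | a :: b :: c :: d :: e :: rest' =>
      rw [pvALoop]
      have hlt : l.length < (l ++ (a :: b :: c :: d :: e :: rest')).length := by
        simp
      have h1 : PySem.List.pyGetD (l ++ a :: b :: c :: d :: e :: rest') ((l.length : Int) + 1) "" = b := by
        have := pvGet_pref l (a :: b :: c :: d :: e :: rest') 1 (by simp)
        push_cast at this; simpa using this
      have h2 : PySem.List.pyGetD (l ++ a :: b :: c :: d :: e :: rest') ((l.length : Int) + 2) "" = c := by
        have := pvGet_pref l (a :: b :: c :: d :: e :: rest') 2 (by simp)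
        push_cast at this; simpa using this
      have h3 : PySem.List.pyGetD (l ++ a :: b :: c :: d :: e :: rest') ((l.length : Int) + 3) "" = d := by
        have := pvGet_pref l (a :: b :: c :: d :: e :: rest') 3 (by simp)
        push_cast at this; simpa using this
      have h4 : PySem.List.pyGetD (l ++ a :: b :: c :: d :: e :: rest') ((l.length : Int) + 4) "" = e := by
        have := pvGet_pref l (a :: b :: c :: d :: e :: rest') 4 (by simp)
        push_cast at this; simpa using this
      simp only [hlt, if_pos, h1, h2, h3, h4]
      have hrec : l.length + 5 = (l ++ [a, b, c, d, e]).length := by simp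
      have hsplit : l ++ a :: b :: c :: d :: e :: rest' = (l ++ [a, b, c, d, e]) ++ rest' := by
        simp
      rw [hrec, hsplit,
        ih rest'.length (by simp at hn; omega) rest' (l ++ [a, b, c, d, e]) cinta _ rfl
          (by simp at hmod ⊢; omega),
        pvBBody_cons5]
      split <;> simp

-- ===== VERDICT =====
theorem parse_all_columns_py_spec : Claim_equal_parse_all_columns_py := by
  intro resultado cinta _
  unfold Spec_parse_all_columns_py parse_all_columns_py parse_all_columns_py_alt
  by_cases h : resultado.length % 5 = 0
  · simp only [h, if_pos, ne_eq, not_true_eq_false, if_false]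
    have := pvALoop_spec resultado.length resultado [] cinta [] rfl h
    simpa [pvBBody] using this

  · simp [h]
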